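-- pv_equiv track=rewrite | github.com/dplocki/advent-of-code | 2018_04.py | build_guard_table
-- ===== SOURCE A (Python) =====
-- def build_guard_table(activities_logs):
--     guards_table = {}
--     fall_asleep_on = None
--
--     for guard_id, isWakeUp, minute in activities_logs:
--         if not guard_id in guards_table:
--             guards_table[guard_id] = [0] * 60
--
--         if isWakeUp:
--             for i in range(minute - fall_asleep_on):
--                 guards_table[guard_id][i + fall_asleep_on] += 1
--         else:
--             fall_asleep_on = minute
--
--     return guards_table
-- ===== SOURCE B (Python) =====
-- def build_guard_table(activities_logs):
--     intervals = {}
--     fall_asleep_on = None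
--
--     for guard_id, isWakeUp, minute in activities_logs:
--         spans = intervals.setdefault(guard_id, [])
--         if isWakeUp:
--             spans.append((fall_asleep_on, minute))
--         else:
--             fall_asleep_on = minute
--
--     return {guard_id: [sum(1 for start, end in spans if start <= m < end) for m in range(60)]
--             for guard_id, spans in intervals.items()}
-- ===== Notes on version B (the rewrite author's own statement) =====
-- stated objective: alternative
-- what changed: Instead of stamping every slept minute into a per-guard 60-slot array inside the event loop, B only records (fall_asleep, wake) interval pairs per guard during the loop and builds each guard's 60-entry table afterwards by counting, for each minute, the recorded intervals that cover it.
import Mathlib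
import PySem

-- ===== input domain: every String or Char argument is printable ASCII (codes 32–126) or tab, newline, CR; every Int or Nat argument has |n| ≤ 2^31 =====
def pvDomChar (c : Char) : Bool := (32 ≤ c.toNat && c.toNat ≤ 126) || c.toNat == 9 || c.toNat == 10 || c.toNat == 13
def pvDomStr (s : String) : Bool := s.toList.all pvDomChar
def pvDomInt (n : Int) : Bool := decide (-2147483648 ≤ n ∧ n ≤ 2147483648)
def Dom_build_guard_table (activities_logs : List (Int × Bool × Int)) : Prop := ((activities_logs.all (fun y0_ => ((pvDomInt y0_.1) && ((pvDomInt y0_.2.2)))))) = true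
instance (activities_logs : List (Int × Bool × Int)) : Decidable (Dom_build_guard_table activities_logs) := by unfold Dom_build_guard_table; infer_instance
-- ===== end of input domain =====

-- B records per-guard (sleep, wake) interval pairs and builds the 60-minute table afterwards by
-- counting covering intervals per minute, instead of A's in-loop minute-by-minute stamping.
-- ===== PORT A =====

-- guards_table[guard_id][i] += 1 : Python raises IndexError when i is out of [-60,60) — those
-- inputs are excluded by Pre_; pyGetD/pySetD are the total forms, exact on in-range indices
-- (including Python's negative-index wraparound).
def pvIncAt (r : List Int) (i : Int) : List Int :=
  PySem.List.pySetD r i (PySem.List.pyGetD r i 0 + 1)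

-- one iteration of A's 'for guard_id, isWakeUp, minute in activities_logs' loop;
-- state = (guards_table, fall_asleep_on).  'fa.getD 0': Python raises TypeError when
-- fall_asleep_on is None at a wake event — excluded by Pre_.
def pvStepA (st : PySem.Dict Int (List Int) × Option Int) (ev : Int × Bool × Int) :
    PySem.Dict Int (List Int) × Option Int :=
  let tbl := if st.1.contains ev.1 then st.1 else st.1.insert ev.1 (List.replicate 60 0)
  if ev.2.1 then
    let s := st.2.getD 0
    let row := (PySem.List.pyRange 0 (ev.2.2 - s) 1).foldl
      (fun r i => pvIncAt r (i + s)) (tbl.getD ev.1 [])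
    (tbl.insert ev.1 row, st.2)
  else
    (tbl, some ev.2.2)

def build_guard_table (activities_logs : List (Int × Bool × Int)) : List (Int × List Int) :=
  (activities_logs.foldl pvStepA (PySem.Dict.empty, none)).1.items

-- ===== PORT B =====

-- sum(1 for start, end in spans if start <= m < end)
def pvCnt (spans : List (Int × Int)) (m : Int) : Int :=
  spans.foldl (fun acc p => if p.1 ≤ m ∧ m < p.2 then acc + 1 else acc) 0

-- [sum(...) for m in range(60)]
def pvCountRow (spans : List (Int × Int)) : List Int :=
  (PySem.List.pyRange 0 60 1).map (fun m => pvCnt spans m)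

-- one iteration of B's event loop; state = (intervals, fall_asleep_on).
-- '(fa.getD 0, m)': Python B stores (None, m) here and later raises TypeError comparing it —
-- excluded by Pre_.
def pvStepB (st : PySem.Dict Int (List (Int × Int)) × Option Int) (ev : Int × Bool × Int) :
    PySem.Dict Int (List (Int × Int)) × Option Int :=
  let d := st.1.setdefault ev.1 []
  if ev.2.1 then
    (d.insert ev.1 (d.getD ev.1 [] ++ [(st.2.getD 0, ev.2.2)]), st.2)
  else
    (d, some ev.2.2)

def build_guard_table_alt (activities_logs : List (Int × Bool × Int)) : List (Int × List Int) :=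
  ((activities_logs.foldl pvStepB (PySem.Dict.empty, none)).1.items).map
    (fun p => (p.1, pvCountRow p.2))

-- ===== PRECONDITION & SPEC =====

-- minute of the latest sleep event in the list (None if there is none)
def pvLastSleep (l : List (Int × Bool × Int)) : Option Int :=
  l.foldl (fun acc e => if e.2.1 then acc else some e.2.2) none

-- a wake at minute m after a latest sleep at minute s is admissible iff its stamped index range
-- is empty (m ≤ s) or entirely inside [0,60)
def pvGoodEv (o : Option Int) (m : Int) : Bool :=
  match o with
  | none => false
  | some s => decide (m ≤ s) || (decide (0 ≤ s) && decide (m ≤ 60))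

-- Pre_ excludes logs where a wake event precedes every sleep event (A raises TypeError) and wake
-- events whose stamped minute range [latest-sleep, wake) is non-empty yet not inside [0,60): there
-- A raises IndexError, or — for a negative latest-sleep minute — returns a table silently wrapped
-- by Python negative indexing, an artefact B does not reproduce (see cites).
def Pre_build_guard_table (activities_logs : List (Int × Bool × Int)) : Prop :=
  ∀ i : Fin activities_logs.length, (activities_logs.get i).2.1 = true →
    pvGoodEv (pvLastSleep (activities_logs.take i)) ((activities_logs.get i).2.2) = true

instance (activities_logs : List (Int × Bool × Int)) : Decidable (Pre_build_guard_table activities_logs) := by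
  unfold Pre_build_guard_table; infer_instance

def pvWitness_build_guard_table : (List (Int × Bool × Int)) :=
  [(10, false, 5), (10, true, 7), (7, false, 59), (10, true, 30)]

def Spec_build_guard_table (activities_logs : List (Int × Bool × Int)) (out : List (Int × List Int)) : Prop := out = build_guard_table_alt activities_logs
instance (activities_logs : List (Int × Bool × Int)) (out : List (Int × List Int)) : Decidable (Spec_build_guard_table activities_logs out) := by unfold Spec_build_guard_table; infer_instance

-- ===== CLAIM (what is proved, stated in full; the proofs are below) =====
def Claim_equal_build_guard_table : Prop := ∀ (activities_logs : List (Int × Bool × Int)), Dom_build_guard_table activities_logs → Pre_build_guard_table activities_logs → Spec_build_guard_table activities_logs (build_guard_table activities_logs)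

-- ===== LEMMAS AND PROOFS =====

-- the invariant the event loop keeps about the not-yet-processed events: every wake event is
-- admissible for the fall-asleep state it will meet
def pvEvOk : Option Int → List (Int × Bool × Int) → Prop
  | _, [] => True
  | fa, e :: t =>
      (e.2.1 = true → pvGoodEv fa e.2.2 = true) ∧ pvEvOk (if e.2.1 then fa else some e.2.2) t

-- A's table is B's interval dict mapped through pvCountRow
def pvMapD (d : PySem.Dict Int (List (Int × Int))) : PySem.Dict Int (List Int) :=
  PySem.Dict.mk (d.items.map (fun p => (p.1, pvCountRow p.2)))

theorem pvLastSleep_append (p q : List (Int × Bool × Int)) :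
    pvLastSleep (p ++ q) = q.foldl (fun acc e => if e.2.1 then acc else some e.2.2) (pvLastSleep p) := by
  simp [pvLastSleep, List.foldl_append]

theorem pvEvOk_of_pre (l p : List (Int × Bool × Int))
    (H : ∀ i : Fin (p ++ l).length, ((p ++ l).get i).2.1 = true →
      pvGoodEv (pvLastSleep ((p ++ l).take i)) (((p ++ l).get i).2.2) = true) :
    pvEvOk (pvLastSleep p) l := by
  induction l generalizing p with
  | nil => trivial
  | cons e t ih =>
    constructor
    · intro hw
      have hi : p.length < (p ++ e :: t).length := by simp
      have hget : (p ++ e :: t).get ⟨p.length, hi⟩ = e := by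
        simp [List.getElem_append_right (Nat.le_refl p.length)]
      have htake : (p ++ e :: t).take p.length = p := by
        simp
      have := H ⟨p.length, hi⟩
      rw [hget, htake] at this
      exact this hw
    · have hls : pvLastSleep (p ++ [e]) = if e.2.1 then pvLastSleep p else some e.2.2 := by
        rw [pvLastSleep_append]; rfl
      have := ih (p ++ [e]) (by rw [List.append_assoc]; simpa using H)
      rw [hls] at this
      exact this

theorem pvCnt_append (spans : List (Int × Int)) (s e m : Int) :
    pvCnt (spans ++ [(s, e)]) m = pvCnt spans m + (if s ≤ m ∧ m < e then 1 else 0) := by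
  simp only [pvCnt, List.foldl_append, List.foldl_cons, List.foldl_nil]
  split_ifs <;> omega

theorem pvCountRow_append_empty (spans : List (Int × Int)) (s m : Int) (h : m ≤ s) :
    pvCountRow (spans ++ [(s, m)]) = pvCountRow spans := by
  unfold pvCountRow
  apply List.map_congr_left
  intro j _
  rw [pvCnt_append]
  split_ifs with hj
  · omega
  · ring

theorem pvIncAt_countRow_map (f : Int → Int) (k : Int) (h0 : 0 ≤ k) (h60 : k < 60) :
    pvIncAt ((PySem.List.pyRange 0 60 1).map f) k
      = (PySem.List.pyRange 0 60 1).map (fun j => f j + if j = k then 1 else 0) := by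
  unfold pvIncAt
  rw [PySem.List.pySetD_of_nonneg _ _ h0,
      PySem.List.pyGetD_map_pyRange_of_nonneg f 60 k 0 h0 (by omega)]
  apply List.ext_getElem
  · simp [PySem.List.length_pyRange_one]
  · intro i h1 h2
    simp only [List.getElem_set, List.getElem_map, PySem.List.getElem_pyRange_one]
    have hlen : i < 60 := by
      simpa [PySem.List.length_pyRange_one] using h2
    split_ifs with ha hb hb
    · have : (0 : Int) + i = k := by omega
      rw [this]
    · omega
    · omega
    · ring

theorem pvStamp_count (spans : List (Int × Int)) (s : Int) (n : Nat)
    (hs : 0 ≤ s) (hm : s + n ≤ 60) :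
    (PySem.List.pyRange 0 (n : Int) 1).foldl (fun r i => pvIncAt r (i + s)) (pvCountRow spans)
      = pvCountRow (spans ++ [(s, s + (n : Int))]) := by
  induction n with
  | zero =>
    rw [PySem.List.pyRange_one_eq_nil (by omega)]
    simp only [List.foldl_nil, Nat.cast_zero, add_zero]
    exact (pvCountRow_append_empty spans s s le_rfl).symm
  | succ n ih =>
    have hc : ((n + 1 : Nat) : Int) = (n : Int) + 1 := by push_cast; ring
    rw [hc, PySem.List.pyRange_one_succ_right (by positivity), List.foldl_append]
    rw [ih (by push_cast at hm ⊢; omega)]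
    simp only [List.foldl_cons, List.foldl_nil]
    unfold pvCountRow
    rw [pvIncAt_countRow_map (pvCnt (spans ++ [(s, s + (n : Int))])) ((n : Int) + s)
        (by omega) (by push_cast at hm; omega)]
    apply List.map_congr_left
    intro j _
    rw [pvCnt_append, pvCnt_append]
    split_ifs <;> omega

theorem pvStamp_count' (spans : List (Int × Int)) (s m : Int)
    (h : pvGoodEv (some s) m = true) :
    (PySem.List.pyRange 0 (m - s) 1).foldl (fun r i => pvIncAt r (i + s)) (pvCountRow spans)
      = pvCountRow (spans ++ [(s, m)]) := by
  have h' : m ≤ s ∨ (0 ≤ s ∧ m ≤ 60) := by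
    simp only [pvGoodEv, Bool.or_eq_true, Bool.and_eq_true, decide_eq_true_eq] at h
    tauto
  by_cases hms : m ≤ s
  · rw [PySem.List.pyRange_one_eq_nil (by omega), List.foldl_nil,
        pvCountRow_append_empty spans s m hms]
  · obtain ⟨hs, h60⟩ : 0 ≤ s ∧ m ≤ 60 := by tauto
    obtain ⟨n, hn⟩ : ∃ n : Nat, m = s + (n : Int) := ⟨(m - s).toNat, by omega⟩
    subst hn
    have he : s + (n : Int) - s = (n : Int) := by ring
    rw [he]
    exact pvStamp_count spans s n hs (by omega)

theorem pvMapD_keys (d : PySem.Dict Int (List (Int × Int))) : (pvMapD d).keys = d.keys := by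
  simp [pvMapD, PySem.Dict.keys, List.map_map, Function.comp_def]

theorem pvMapD_contains (d : PySem.Dict Int (List (Int × Int))) (g : Int) :
    (pvMapD d).contains g = d.contains g := by
  rw [PySem.Dict.contains_eq_decide_mem_keys, PySem.Dict.contains_eq_decide_mem_keys, pvMapD_keys]

theorem pvMapD_get? (d : PySem.Dict Int (List (Int × Int))) (g : Int) :
    (pvMapD d).get? g = (d.get? g).map pvCountRow := by
  obtain ⟨l⟩ := d
  show (PySem.Dict.mk (l.map (fun p => (p.1, pvCountRow p.2)))).get? g
      = ((PySem.Dict.mk l).get? g).map pvCountRow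
  induction l with
  | nil => rfl
  | cons hd tl ih =>
    obtain ⟨k, v⟩ := hd
    simp only [List.map_cons, PySem.Dict.get?_mk_cons]
    split <;> simp_all

theorem pvMapD_insert (d : PySem.Dict Int (List (Int × Int))) (g : Int) (v : List (Int × Int)) :
    pvMapD (d.insert g v) = (pvMapD d).insert g (pvCountRow v) := by
  apply PySem.Dict.ext
  have hitems : (pvMapD d).items = d.items.map (fun p => (p.1, pvCountRow p.2)) := rfl
  by_cases h : d.contains g = true
  · rw [show (pvMapD (d.insert g v)).items
        = ((d.insert g v).items).map (fun p => (p.1, pvCountRow p.2)) from rfl,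
      PySem.Dict.items_insert_of_contains _ _ h,
      PySem.Dict.items_insert_of_contains _ _ ((pvMapD_contains d g).trans h),
      hitems, List.map_map, List.map_map]
    apply List.map_congr_left
    intro p _
    by_cases hp : p.1 = g <;> simp [hp]
  · have h' : d.contains g = false := by simpa using h
    rw [show (pvMapD (d.insert g v)).items
        = ((d.insert g v).items).map (fun p => (p.1, pvCountRow p.2)) from rfl,
      PySem.Dict.items_insert_of_not_contains _ _ h',
      PySem.Dict.items_insert_of_not_contains _ _ (by rw [pvMapD_contains]; exact h'),
      hitems, List.map_append]
    rfl

theorem pvCountRow_nil : pvCountRow [] = List.replicate 60 0 := by decide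

theorem pvStep_comm (d : PySem.Dict Int (List (Int × Int))) (fa : Option Int)
    (e : Int × Bool × Int) (h : e.2.1 = true → pvGoodEv fa e.2.2 = true) :
    pvStepA (pvMapD d, fa) e = (pvMapD (pvStepB (d, fa) e).1, (pvStepB (d, fa) e).2) := by
  obtain ⟨g, w, m⟩ := e
  unfold pvStepA pvStepB
  simp only
  have htbl : (if (pvMapD d).contains g then pvMapD d
      else (pvMapD d).insert g (List.replicate 60 0)) = pvMapD (d.setdefault g []) := by
    rw [pvMapD_contains]
    by_cases hc : d.contains g
    · rw [if_pos hc, PySem.Dict.setdefault_of_contains _ _ hc]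
    · rw [if_neg (by simp [hc]), PySem.Dict.setdefault_of_not_contains _ _ (by simpa using hc),
          pvMapD_insert, pvCountRow_nil]
  rw [htbl]
  set d1 := d.setdefault g [] with hd1
  cases w with
  | false => simp
  | true =>
    simp only [if_true]
    have hgood := h rfl
    obtain ⟨s, hs⟩ : ∃ s, fa = some s := by
      cases fa with
      | none => simp [pvGoodEv] at hgood
      | some s => exact ⟨s, rfl⟩
    subst hs
    simp only [Option.getD_some]
    have hc1 : d1.contains g = true := by
      rw [hd1, PySem.Dict.contains_setdefault]; simp
    obtain ⟨v, hv⟩ : ∃ v, d1.get? g = some v := by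
      have hiso := PySem.Dict.contains_eq_isSome_get? (d := d1) (k := g)
      rw [hc1] at hiso
      exact Option.isSome_iff_exists.mp hiso.symm
    have hgd1 : d1.getD g ([] : List (Int × Int)) = v :=
      PySem.Dict.getD_of_get?_eq_some _ _ hv
    have hgdm : (pvMapD d1).getD g ([] : List Int) = pvCountRow v := by
      rw [PySem.Dict.getD_eq_get?_getD, pvMapD_get?, hv]; rfl
    rw [hgdm, hgd1, pvStamp_count' v s m hgood, pvMapD_insert]

theorem pvMainLoop (l : List (Int × Bool × Int)) :
    ∀ (d : PySem.Dict Int (List (Int × Int))) (fa : Option Int), pvEvOk fa l →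
      l.foldl pvStepA (pvMapD d, fa)
        = (pvMapD (l.foldl pvStepB (d, fa)).1, (l.foldl pvStepB (d, fa)).2) := by
  induction l with
  | nil => intro d fa _; rfl
  | cons e t ih =>
    intro d fa hok
    obtain ⟨h1, h2⟩ := hok
    simp only [List.foldl_cons]
    rw [pvStep_comm d fa e h1]
    apply ih
    have hfa2 : (pvStepB (d, fa) e).2 = if e.2.1 then fa else some e.2.2 := by
      obtain ⟨g, w, me⟩ := e
      unfold pvStepB
      cases w <;> simp
    rw [hfa2]
    exact h2

-- ===== VERDICT (by name: the statement is the Claim_ definition above) =====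
theorem build_guard_table_spec : Claim_equal_build_guard_table := by
  intro logs _ hpre
  unfold Spec_build_guard_table build_guard_table build_guard_table_alt
  have h0 : pvEvOk (pvLastSleep []) logs := pvEvOk_of_pre logs [] (by simpa using hpre)
  have hmap : pvMapD PySem.Dict.empty = PySem.Dict.empty := rfl
  have := pvMainLoop logs PySem.Dict.empty none (by simpa [pvLastSleep] using h0)
  rw [← hmap, this]
  simp [pvMapD]
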